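-- pv_equiv track=rewrite | github.com/sujayyy/Medicare-Excellence | backend/services/triage_service.py | _score_from_phrases
-- ===== SOURCE A (Python) =====
-- def _score_from_phrases(message: str, phrase_weights: dict[str, int]) -> tuple[int, list[str]]:
--     score = 0
--     matched: list[str] = []
--     for phrase, weight in phrase_weights.items():
--         if phrase in message:
--             score += weight
--             matched.append(phrase)
--     return score, matched
-- ===== SOURCE B (Python) =====
-- def _score_from_phrases(message: str, phrase_weights: dict[str, int]) -> tuple[int, list[str]]:
--     n = len(message)
--     subs = set()
--     for L in dict.fromkeys(len(p) for p in phrase_weights):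
--         for i in range(n - L + 1):
--             subs.add(message[i:i + L])
--     hits = [(p, w) for p, w in phrase_weights.items() if p in subs]
--     return sum(w for _, w in hits), [p for p, _ in hits]
-- ===== Notes on version B (the rewrite author's own statement) =====
-- stated objective: faster
-- what changed: Instead of scanning the message once per phrase, B precomputes a hash set of the message's substrings for each distinct phrase length, then selects matching phrases by a single set lookup each and forms the score and matched list as sum/map over the filtered phrase list.
import Mathlib
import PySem

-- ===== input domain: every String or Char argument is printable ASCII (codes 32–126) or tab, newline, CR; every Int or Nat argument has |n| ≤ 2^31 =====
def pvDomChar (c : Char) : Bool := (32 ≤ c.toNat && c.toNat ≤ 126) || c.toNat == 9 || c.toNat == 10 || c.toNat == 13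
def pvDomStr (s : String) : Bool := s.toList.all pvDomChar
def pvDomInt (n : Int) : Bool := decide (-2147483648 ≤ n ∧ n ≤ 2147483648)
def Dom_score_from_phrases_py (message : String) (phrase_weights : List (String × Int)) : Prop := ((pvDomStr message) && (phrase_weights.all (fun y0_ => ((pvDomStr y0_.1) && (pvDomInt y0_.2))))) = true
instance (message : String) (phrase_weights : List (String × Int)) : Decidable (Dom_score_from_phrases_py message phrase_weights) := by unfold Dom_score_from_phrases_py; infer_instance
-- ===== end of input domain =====

-- B re-implements A with a precomputed set of the message's substrings (one per occurring
-- phrase length) plus filter/map/sum over the phrase list, instead of scanning the message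
-- per phrase; objective: faster (measured).

-- ===== PORT A =====
def score_from_phrases_py (message : String) (phrase_weights : List (String × Int)) : Int × List String :=
  phrase_weights.foldl
    (fun acc pr =>
      if PySem.Str.isIn pr.1 message then (acc.1 + pr.2, acc.2 ++ [pr.1]) else acc)
    (0, [])

-- ===== PORT B =====
-- the substring set: for each length L in lens, all message[i:i+L]
def pvSubs (message : String) (lens : List Int) : PySem.Set String :=
  lens.foldl
    (fun s L =>
      (PySem.List.pyRange 0 (PySem.Str.len message - L + 1) 1).foldl
        (fun s i => PySem.Set.add s (PySem.Str.slice message (some i) (some (i + L)))) s)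
    PySem.Set.empty

def score_from_phrases_py_alt (message : String) (phrase_weights : List (String × Int)) : Int × List String :=
  let subs := pvSubs message (PySem.List.dedup (phrase_weights.map (fun pr => PySem.Str.len pr.1)))
  let hits := phrase_weights.filter (fun pr => PySem.Set.contains subs pr.1)
  ((hits.map (fun pr => pr.2)).sum, hits.map (fun pr => pr.1))

-- ===== PRECONDITION & SPEC =====
def Spec_score_from_phrases_py (message : String) (phrase_weights : List (String × Int)) (out : Int × List String) : Prop := out = score_from_phrases_py_alt message phrase_weights
instance (message : String) (phrase_weights : List (String × Int)) (out : Int × List String) : Decidable (Spec_score_from_phrases_py message phrase_weights out) := by unfold Spec_score_from_phrases_py; infer_instance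

-- ===== CLAIM (what is proved, stated in full; the proofs are below) =====
def Claim_equal_score_from_phrases_py : Prop := ∀ (message : String) (phrase_weights : List (String × Int)), Dom_score_from_phrases_py message phrase_weights → Spec_score_from_phrases_py message phrase_weights (score_from_phrases_py message phrase_weights)

-- ===== LEMMAS AND PROOFS =====

-- membership in the substring set, characterised
theorem mem_pvSubs (message : String) (lens : List Int) (x : String) :
    x ∈ pvSubs message lens ↔
      ∃ L ∈ lens, ∃ i : Int, (0 ≤ i ∧ i < PySem.Str.len message - L + 1) ∧
        x = PySem.Str.slice message (some i) (some (i + L)) := by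
  have gen : ∀ (ls : List Int) (s : PySem.Set String),
      x ∈ ls.foldl
        (fun s L =>
          (PySem.List.pyRange 0 (PySem.Str.len message - L + 1) 1).foldl
            (fun s i => PySem.Set.add s (PySem.Str.slice message (some i) (some (i + L)))) s) s ↔
      x ∈ s ∨ ∃ L ∈ ls, ∃ i : Int, (0 ≤ i ∧ i < PySem.Str.len message - L + 1) ∧
        x = PySem.Str.slice message (some i) (some (i + L)) := by
    intro ls
    induction ls with
    | nil => simp
    | cons L t ih =>
      intro s
      rw [List.foldl_cons, ih,
        ← PySem.Set.update_map_eq_foldl_add (PySem.List.pyRange 0 (PySem.Str.len message - L + 1) 1)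
          (fun i => PySem.Str.slice message (some i) (some (i + L))) s,
        PySem.Set.mem_update]
      simp only [List.mem_map, PySem.List.mem_pyRange_one, List.mem_cons]
      constructor
      · rintro ((hs | ⟨i, hi, hx⟩) | ⟨L', hL', i, hi, hx⟩)
        · exact Or.inl hs
        · exact Or.inr ⟨L, Or.inl rfl, i, hi, hx.symm⟩
        · exact Or.inr ⟨L', Or.inr hL', i, hi, hx⟩
      · rintro (hs | ⟨L', hL' | hL', i, hi, hx⟩)
        · exact Or.inl (Or.inl hs)
        · exact Or.inl (Or.inr ⟨i, by simpa [hL'] using hi, by simpa [hL'] using hx.symm⟩)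
        · exact Or.inr ⟨L', hL', i, hi, hx⟩
  simpa using gen lens PySem.Set.empty

-- every element of the set is a substring of the message
theorem pvSubs_sound (message : String) (lens : List Int)
    (hlens : ∀ L ∈ lens, 0 ≤ L) (x : String) (hx : x ∈ pvSubs message lens) :
    x.toList <:+: message.toList := by
  rcases (mem_pvSubs message lens x).1 hx with ⟨L, hL, i, ⟨hi0, _⟩, hx⟩
  have hiL : (0:Int) ≤ i + L := by have := hlens L hL; omega
  have : x.toList = (message.toList.drop i.toNat).take ((i + L).toNat - i.toNat) := by
    rw [hx, PySem.Str.toList_slice, PySem.Chars.slice_eq_listSlice,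
      PySem.List.slice_toNat message.toList hi0 hiL]
  rw [this]
  exact ((List.take_prefix _ _).isInfix).trans ((List.drop_suffix _ _).isInfix)

-- every substring of the message whose length is in lens is in the set
theorem pvSubs_complete (message : String) (lens : List Int) (p : String)
    (hlen : PySem.Str.len p ∈ lens) (hp : p.toList <:+: message.toList) :
    p ∈ pvSubs message lens := by
  rcases hp with ⟨s, t, hst⟩
  refine (mem_pvSubs message lens p).2
    ⟨PySem.Str.len p, hlen, (s.length : Int), ⟨by positivity, ?_⟩, ?_⟩
  · have hle : s.length + p.toList.length ≤ message.toList.length := by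
      rw [← hst]; simp
    simp only [PySem.Str.len]
    omega
  · rw [← String.toList_inj, PySem.Str.toList_slice, PySem.Chars.slice_eq_listSlice]
    have hcast : (s.length : Int) + PySem.Str.len p = ((s.length + p.toList.length : Nat) : Int) := by
      simp only [PySem.Str.len]; push_cast; ring
    rw [hcast, PySem.List.slice_natCast]
    have : message.toList.drop s.length = p.toList ++ t := by
      rw [← hst, List.append_assoc, List.drop_left]
    rw [this]
    simp

-- the two membership tests agree on the phrases of the list
theorem contains_eq_isIn (message : String) (phrase_weights : List (String × Int))
    (pr : String × Int) (hpr : pr ∈ phrase_weights) :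
    PySem.Set.contains
      (pvSubs message (PySem.List.dedup (phrase_weights.map (fun pr => PySem.Str.len pr.1)))) pr.1
      = PySem.Str.isIn pr.1 message := by
  set lens := PySem.List.dedup (phrase_weights.map (fun pr => PySem.Str.len pr.1)) with hlensdef
  have hlen : PySem.Str.len pr.1 ∈ lens := by
    rw [hlensdef, PySem.List.mem_dedup]
    exact List.mem_map.2 ⟨pr, hpr, rfl⟩
  have hnn : ∀ L ∈ lens, 0 ≤ L := by
    intro L hL
    rw [hlensdef, PySem.List.mem_dedup] at hL
    rcases List.mem_map.1 hL with ⟨q, _, rfl⟩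
    simp [PySem.Str.len]
  by_cases h : pr.1.toList <:+: message.toList
  · rw [(PySem.Set.contains_iff _ _).mpr (pvSubs_complete message lens pr.1 hlen h),
      (PySem.Str.isIn_iff_infix _ _).mpr h]
  · have h1 : PySem.Set.contains (pvSubs message lens) pr.1 = false := by
      rw [Bool.eq_false_iff]
      intro hc
      exact h (pvSubs_sound message lens hnn pr.1 ((PySem.Set.contains_iff _ _).1 hc))
    have h2 : PySem.Str.isIn pr.1 message = false := by
      rw [Bool.eq_false_iff]
      intro hc
      exact h ((PySem.Str.isIn_iff_infix _ _).1 hc)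
    rw [h1, h2]

-- A's accumulator loop computes (sum of weights, list of phrases) of the filtered list
theorem foldl_eq_filter (c : String × Int → Bool) :
    ∀ (pw : List (String × Int)) (sc : Int) (ms : List String),
      pw.foldl (fun acc pr => if c pr then (acc.1 + pr.2, acc.2 ++ [pr.1]) else acc) (sc, ms)
        = (sc + ((pw.filter c).map (fun pr => pr.2)).sum, ms ++ (pw.filter c).map (fun pr => pr.1)) := by
  intro pw
  induction pw with
  | nil => simp
  | cons hd t ih =>
    intro sc ms
    by_cases h : c hd
    · simp [h, ih, add_assoc]
    · simp [h, ih]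

-- ===== VERDICT (by name: the statement is the Claim_ definition above) =====
theorem score_from_phrases_py_spec : Claim_equal_score_from_phrases_py := by
  intro message phrase_weights _
  unfold Spec_score_from_phrases_py score_from_phrases_py score_from_phrases_py_alt
  rw [foldl_eq_filter (fun pr => PySem.Str.isIn pr.1 message) phrase_weights 0 []]
  rw [List.filter_congr (fun pr hpr => (contains_eq_isIn message phrase_weights pr hpr).symm)]
  simp
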